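-- pv_equiv track=rewrite | github.com/phetdam/daily-coding-problem | col_order.py | unordered_cols
-- ===== SOURCE A (Python) =====
-- def unordered_cols(mat):
--     """
--     O(nm) solution. we basically just look for columns that are not in the
--     ascending lexicographic order that we desire. the semantics of the problem
--     statement are a little confusing for some reason.
--     """
--     assert mat is not None
--     # n rows, m columns
--     nrow = len(mat)
--     ncol = len(mat[0])
--     # number of columns to remove
--     rc = 0
--     # for each column
--     for col in range(ncol):
--         # check each row entry to see if it is larger than the previous;
--         # if this is not the case, increment rc and break the loop
--         for row in range(1, nrow):
--             if mat[row][col] < mat[row - 1][col]: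
--                 rc = rc + 1
--                 break
--     # return number of unordered columns to remove
--     return rc
-- ===== SOURCE B (Python) =====
-- def unordered_cols(mat):
--     """Count columns not in ascending order: transpose with zip and compare
--     each column with its sorted form."""
--     assert mat is not None
--     return sum(1 for col in zip(*mat) if list(col) != sorted(col))
-- ===== Notes on version B (the rewrite author's own statement) =====
-- stated objective: idiomatic
-- what changed: Replaces the index-based nested loop with an early break by transposing via zip(*mat) and counting columns that differ from their sorted form.
-- outside the precondition, e.g. on unordered_cols([[2, 2], [1, 1], [0]]): A returns 2, B returns 1
import Mathlib
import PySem

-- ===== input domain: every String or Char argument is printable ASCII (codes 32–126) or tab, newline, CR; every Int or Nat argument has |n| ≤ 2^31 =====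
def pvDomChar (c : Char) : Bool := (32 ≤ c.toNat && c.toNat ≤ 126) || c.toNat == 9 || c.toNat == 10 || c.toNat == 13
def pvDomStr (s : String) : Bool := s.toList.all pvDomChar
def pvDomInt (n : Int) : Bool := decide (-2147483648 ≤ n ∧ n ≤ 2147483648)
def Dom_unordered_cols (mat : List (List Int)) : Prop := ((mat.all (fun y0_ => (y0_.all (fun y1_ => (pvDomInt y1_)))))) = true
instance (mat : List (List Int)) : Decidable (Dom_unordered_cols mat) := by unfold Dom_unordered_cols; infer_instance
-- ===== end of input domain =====

-- B replaces A's index-based nested scan (early break) by transposing with zip(*mat)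
-- and counting columns that differ from their sorted form (idiomatic; not faster).

-- ===== PORT A =====
-- inner loop 'for row in range(1, nrow): if mat[row][col] < mat[row-1][col]: rc += 1; break'
-- (indices here are nonnegative and in range on Pre_, so plain getD is exact there)
def aScan (mat : List (List Int)) (col : Nat) : List Nat → Bool
  | [] => false
  | row :: rest =>
    if (mat.getD row []).getD col 0 < (mat.getD (row - 1) []).getD col 0 then true
    else aScan mat col rest

def unordered_cols (mat : List (List Int)) : Int :=
  let nrow := mat.length
  let ncol := (mat.getD 0 []).length
  (List.range ncol).foldl
    (fun rc col => if aScan mat col (List.range' 1 (nrow - 1)) then rc + 1 else rc) 0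

-- ===== PORT B =====
-- zip(*mat): stop when any row is exhausted, else emit the heads and recurse on the
-- tails; the first row's length bounds the number of steps, so it serves as the fuel
-- of the structural recursion (the loop can never run longer than the first row).
def zipColsAux (fuel : Nat) (mat : List (List Int)) : List (List Int) :=
  match fuel with
  | 0 => []
  | Nat.succ n =>
    if mat.isEmpty || mat.any (fun x => x.isEmpty) then []
    else (mat.map (fun x => x.headD 0)) :: zipColsAux n (mat.map (fun x => x.tail))

def zipCols (mat : List (List Int)) : List (List Int) :=
  zipColsAux (mat.headD []).length mat

-- sum(1 for col in zip(*mat) if list(col) != sorted(col))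
def unordered_cols_alt (mat : List (List Int)) : Int :=
  ((zipCols mat).countP (fun col => decide (col ≠ PySem.List.sorted col (fun x => x))) : Int)

-- ===== PRECONDITION & SPEC =====
-- Pre_ excludes mat == [] (A raises IndexError on mat[0]) and ragged matrices with a
-- row shorter than the first row, where A raises IndexError unless its early break
-- happens to fire first — the values A accidentally returns there are artefacts of the
-- break order (e.g. [[2,2],[1,1],[0]], where A returns 2).
def Pre_unordered_cols (mat : List (List Int)) : Prop :=
  mat ≠ [] ∧ ∀ r ∈ mat, (mat.headD []).length ≤ r.length
instance (mat : List (List Int)) : Decidable (Pre_unordered_cols mat) := by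
  unfold Pre_unordered_cols; infer_instance
def pvWitness_unordered_cols : List (List Int) := [[1, 2], [3, 0]]

def Spec_unordered_cols (mat : List (List Int)) (out : Int) : Prop := out = unordered_cols_alt mat
instance (mat : List (List Int)) (out : Int) : Decidable (Spec_unordered_cols mat out) := by
  unfold Spec_unordered_cols; infer_instance

-- ===== CLAIM (what is proved, stated in full; the proofs are below) =====
def Claim_equal_unordered_cols : Prop := ∀ (mat : List (List Int)), Dom_unordered_cols mat → Pre_unordered_cols mat → Spec_unordered_cols mat (unordered_cols mat)

-- ===== LEMMAS AND PROOFS =====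

theorem getD_tail_eq (r : List Int) (c : Nat) : r.tail.getD c 0 = r.getD (c + 1) 0 := by
  cases r <;> rfl

theorem headD_eq_getD (r : List Int) : r.headD 0 = r.getD 0 0 := by
  cases r <;> rfl

-- zip(*mat) is the list of the first n columns when every row has length ≥ n
-- and the first row has length exactly n
theorem zipColsAux_eq (n : Nat) : ∀ (mat : List (List Int)), mat ≠ [] →
    (∀ r ∈ mat, n ≤ r.length) →
    zipColsAux n mat = (List.range n).map (fun c => mat.map (fun r => r.getD c 0)) := by
  induction n with
  | zero => intro mat _ _; rfl
  | succ n ih =>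
    intro mat hne hall
    cases mat with
    | nil => exact absurd rfl hne
    | cons r rs =>
      have hcond : ¬ (((r :: rs).isEmpty || (r :: rs).any fun x => x.isEmpty) = true) := by
        simp only [List.isEmpty_cons, Bool.false_or, List.any_eq_true, not_exists, not_and,
          List.isEmpty_iff]
        intro x hx h0
        have := hall x hx
        simp [h0] at this
      have htails : zipColsAux n ((r :: rs).map (fun x => x.tail)) =
          (List.range n).map (fun c => ((r :: rs).map (fun x => x.tail)).map (fun r => r.getD c 0)) := by
        apply ih
        · simp
        · intro t ht
          simp only [List.mem_map] at ht
          obtain ⟨x, hx, rfl⟩ := ht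
          have := hall x hx
          cases x with
          | nil => simp at this
          | cons a b => simp at this ⊢; omega
      rw [zipColsAux, if_neg hcond, htails, List.range_succ_eq_map]
      simp only [List.map_map]
      congr 1
      · exact List.map_congr_left (fun x _ => headD_eq_getD x)
      · rw [List.map_map]
        apply List.map_congr_left
        intro c _
        simp only [Function.comp_apply]
        apply List.map_congr_left
        intro x _
        simp only [Function.comp_apply]
        rw [getD_tail_eq]

-- A's inner scan-with-break is List.any
theorem aScan_eq_any (mat : List (List Int)) (col : Nat) (l : List Nat) :
    aScan mat col l =
      l.any (fun row => decide ((mat.getD row []).getD col 0 < (mat.getD (row - 1) []).getD col 0)) := by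
  induction l with
  | nil => rfl
  | cons row rest ih =>
    rw [aScan, List.any_cons, ih]
    split_ifs with h
    · rw [decide_eq_true h, Bool.true_or]
    · rw [decide_eq_false h, Bool.false_or]

-- indexing a column through the matrix equals indexing the mapped column list
-- (both defaults are 0, so this holds for every index)
theorem getD_map_col (mat : List (List Int)) (c row : Nat) :
    (mat.getD row []).getD c 0 = (mat.map (fun r => r.getD c 0)).getD row 0 := by
  by_cases h : row < mat.length
  · rw [List.getD_eq_getElem mat [] h,
      List.getD_eq_getElem (mat.map (fun r => r.getD c 0)) 0 (by simpa using h),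
      List.getElem_map]
  · have h' : mat.length ≤ row := by omega
    simp [List.getD, List.getElem?_eq_none h']

-- the adjacency scan over range(1, len(l)) finds a descent iff one exists
theorem any_descent_iff (l : List Int) :
    ((List.range' 1 (l.length - 1)).any (fun row => decide (l.getD row 0 < l.getD (row - 1) 0)) = true) ↔
      ∃ i, i + 1 < l.length ∧ l.getD (i + 1) 0 < l.getD i 0 := by
  simp only [List.any_eq_true, List.mem_range', decide_eq_true_eq]
  constructor
  · rintro ⟨row, ⟨hge, hlt⟩, hdesc⟩
    refine ⟨row - 1, by omega, ?_⟩
    rw [show row - 1 + 1 = row from by omega]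
    exact hdesc
  · rintro ⟨i, hi, hdesc⟩
    refine ⟨i + 1, ⟨by omega, by omega⟩, ?_⟩
    rw [show i + 1 - 1 = i from rfl]
    exact hdesc

-- a list differs from its sorted form iff it has an adjacent descent
theorem ne_sorted_iff_descent (l : List Int) :
    (l ≠ PySem.List.sorted l (fun x => x)) ↔
      ∃ i, i + 1 < l.length ∧ l.getD (i + 1) 0 < l.getD i 0 := by
  constructor
  · intro hne
    by_contra hno
    push Not at hno
    apply hne
    symm
    apply PySem.List.sorted_eq_self_of_pairwise
    apply List.IsChain.pairwise
    rw [List.isChain_iff_getElem]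
    intro i hi
    have := hno i hi
    rw [List.getD_eq_getElem l 0 hi, List.getD_eq_getElem l 0 (Nat.lt_of_succ_lt hi)] at this
    omega
  · rintro ⟨i, hi, hlt⟩ heq
    have hp : l.Pairwise (fun a b => (fun x : Int => x) a ≤ (fun x : Int => x) b) := by
      rw [heq]; exact PySem.List.sorted_pairwise l (fun x => x)
    rw [List.pairwise_iff_getElem] at hp
    have := hp i (i + 1) (Nat.lt_of_succ_lt hi) hi (by omega)
    rw [List.getD_eq_getElem l 0 hi, List.getD_eq_getElem l 0 (Nat.lt_of_succ_lt hi)] at hlt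
    simp only at this
    omega

-- per-column equivalence: A's scan fires iff the column differs from its sorted form
theorem scan_eq_col (mat : List (List Int)) (c : Nat) :
    aScan mat c (List.range' 1 (mat.length - 1)) =
      decide ((mat.map (fun r => r.getD c 0)) ≠ PySem.List.sorted (mat.map (fun r => r.getD c 0)) (fun x => x)) := by
  rw [aScan_eq_any, Bool.eq_iff_iff, decide_eq_true_iff, ne_sorted_iff_descent]
  have hpred : ∀ row : Nat, (decide ((mat.getD row []).getD c 0 < (mat.getD (row - 1) []).getD c 0)) =
      (decide ((mat.map (fun r => r.getD c 0)).getD row 0 < (mat.map (fun r => r.getD c 0)).getD (row - 1) 0)) := by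
    intro row
    rw [getD_map_col, getD_map_col]
  simp only [hpred]
  have hlen : (mat.map (fun r => r.getD c 0)).length = mat.length := by simp
  rw [show mat.length - 1 = (mat.map (fun r => r.getD c 0)).length - 1 from by rw [hlen]]
  exact any_descent_iff (mat.map (fun r => r.getD c 0))

-- ===== VERDICT (by name: the statement is the Claim_ definition above) =====
theorem unordered_cols_spec : Claim_equal_unordered_cols := by
  intro mat _ hpre
  obtain ⟨hne, hall⟩ := hpre
  unfold Spec_unordered_cols unordered_cols unordered_cols_alt zipCols
  have hget0 : mat.getD 0 [] = mat.headD [] := by cases mat <;> rfl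
  rw [hget0]
  rw [zipColsAux_eq (mat.headD []).length mat hne hall]
  rw [PySem.List.foldl_count_if
        (fun col => aScan mat col (List.range' 1 (mat.length - 1))) (List.range (mat.headD []).length) 0]
  rw [List.countP_map]
  simp only [zero_add, Int.natCast_inj]
  apply List.countP_congr
  intro c _
  simp only [Function.comp_apply]
  rw [scan_eq_col mat c]
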